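-- pv_equiv track=rewrite | github.com/MacRover/curie | utils/teros_testbench/micropython_teros_testbench/main.py | legacy_checksum
-- ===== SOURCE A (Python) =====
-- def legacy_checksum(response_bytes):
--     # Exact translation of the documentation's checksum logic
--     sum_val = 0
--
--     for i, b in enumerate(response_bytes):
--         sum_val += b
--         if b == ord('\r'):
--             # Found \r, the next character is the sensor type, which is included in the sum
--             if i + 1 < len(response_bytes):
--                 sum_val += response_bytes[i + 1]
--             break
--
--     # Calculate final printable character
--     return (sum_val % 64) + 32
-- ===== SOURCE B (Python) =====
-- def legacy_checksum(response_bytes):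
--     try:
--         i = list(response_bytes).index(13)
--         total = sum(response_bytes[:i + 2])
--     except ValueError:
--         total = sum(response_bytes)
--     return total % 64 + 32
-- ===== Notes on version B (the rewrite author's own statement) =====
-- stated objective: faster
-- what changed: Replaces the byte-by-byte accumulator loop with break logic by locating the first carriage return via index() and summing a single slice up to i+2 (whole list when absent); the work moves into C-level builtins.
import Mathlib
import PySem

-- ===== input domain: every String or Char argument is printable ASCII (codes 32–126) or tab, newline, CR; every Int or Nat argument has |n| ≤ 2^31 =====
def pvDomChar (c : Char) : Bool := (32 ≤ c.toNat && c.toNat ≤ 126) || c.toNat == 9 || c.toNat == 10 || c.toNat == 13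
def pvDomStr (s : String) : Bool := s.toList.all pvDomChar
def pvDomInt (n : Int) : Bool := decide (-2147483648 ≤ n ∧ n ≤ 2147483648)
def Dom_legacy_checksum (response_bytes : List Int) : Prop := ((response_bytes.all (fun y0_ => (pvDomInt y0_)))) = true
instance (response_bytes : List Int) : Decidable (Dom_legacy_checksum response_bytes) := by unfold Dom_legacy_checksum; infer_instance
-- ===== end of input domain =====

-- B locates the first carriage return with index() and sums one slice instead of A's accumulate-and-break loop; objective: simpler.


-- ===== PORT A =====
-- A's for-loop with break: add each byte; on the first 13 also add the next byte (if the index exists) and stop.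
def legacy_checksum_loop : List Int → Int
  | [] => 0
  | b :: rest =>
    if b = 13 then
      -- 'if i + 1 < len(response_bytes)' ↔ rest is nonempty
      b + (match rest with
           | [] => 0
           | c :: _ => c)
    else
      b + legacy_checksum_loop rest

def legacy_checksum (response_bytes : List Int) : Int :=
  PySem.Int.mod (legacy_checksum_loop response_bytes) 64 + 32

-- ===== PORT B =====
def legacy_checksum_alt (response_bytes : List Int) : Int :=
  let total : Int :=
    match PySem.List.index? response_bytes 13 with
    | some i => (PySem.List.slice response_bytes none (some ((i : Int) + 2))).sum
    | none => response_bytes.sum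
  PySem.Int.mod total 64 + 32

-- ===== PRECONDITION & SPEC =====
def Spec_legacy_checksum (response_bytes : List Int) (out : Int) : Prop := out = legacy_checksum_alt response_bytes
instance (response_bytes : List Int) (out : Int) : Decidable (Spec_legacy_checksum response_bytes out) := by unfold Spec_legacy_checksum; infer_instance

-- ===== CLAIM (what is proved, stated in full; the proofs are below) =====
def Claim_equal_legacy_checksum : Prop := ∀ (response_bytes : List Int), Dom_legacy_checksum response_bytes → Spec_legacy_checksum response_bytes (legacy_checksum response_bytes)

-- ===== LEMMAS AND PROOFS =====
theorem legacy_checksum_loop_eq (xs : List Int) :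
    legacy_checksum_loop xs =
      (match PySem.List.index? xs 13 with
       | some i => (PySem.List.slice xs none (some ((i : Int) + 2))).sum
       | none => xs.sum) := by
  induction xs with
  | nil => simp [legacy_checksum_loop, PySem.List.index?]
  | cons b rest ih =>
    by_cases hb : b = 13
    · subst hb
      rw [PySem.List.index?_cons_self]
      have h2 : ((0 : Nat) : Int) + 2 = ((2 : Nat) : Int) := by norm_num
      simp only [h2, PySem.List.slice_to_natCast]
      cases rest with
      | nil => simp [legacy_checksum_loop]
      | cons c t => simp [legacy_checksum_loop, List.take]
    · rw [PySem.List.index?_cons_of_ne rest hb]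
      cases h : PySem.List.index? rest 13 with
      | none =>
        simp only [Option.map_none]
        rw [show legacy_checksum_loop (b :: rest) = b + legacy_checksum_loop rest from by
          simp [legacy_checksum_loop, hb]]
        rw [ih, h]
        simp
      | some i =>
        simp only [Option.map_some]
        have hc : ((i + 1 : Nat) : Int) + 2 = ((i + 3 : Nat) : Int) := by push_cast; ring
        have hc' : ((i : Nat) : Int) + 2 = ((i + 2 : Nat) : Int) := by push_cast; ring
        simp only [hc, PySem.List.slice_to_natCast]
        rw [show legacy_checksum_loop (b :: rest) = b + legacy_checksum_loop rest from by
          simp [legacy_checksum_loop, hb]]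
        rw [ih, h]
        simp only [hc', PySem.List.slice_to_natCast]
        rw [show i + 3 = (i + 2) + 1 from by omega]
        simp [List.take_succ_cons]

-- ===== VERDICT (by name: the statement is the Claim_ definition above) =====
theorem legacy_checksum_spec : Claim_equal_legacy_checksum := by
  intro xs _
  unfold Spec_legacy_checksum legacy_checksum legacy_checksum_alt
  rw [legacy_checksum_loop_eq]
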